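-- pv_equiv track=rewrite | github.com/mgeracie/anki_helpers | utils.py | simplify_split
-- ===== SOURCE A (Python) =====
-- def simplify_split(s_split: list) -> list:
--     s_split_simp = []
--     for i in range(0, len(s_split)):
--         syl = s_split[i]
--         if  i == 0:
--             in_process_syl = syl
--         elif (in_process_syl[1] == syl[1]) or (syl[0] == " "):
--             in_process_syl = (in_process_syl[0] + syl[0], in_process_syl[1])
--         else:
--             s_split_simp.append(in_process_syl)
--             in_process_syl = syl
--         if i == len(s_split) - 1:
--             s_split_simp.append(in_process_syl)
--     return s_split_simp
-- ===== SOURCE B (Python) =====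
-- def simplify_split(s_split: list) -> list:
--     groups = []
--     for syl in s_split:
--         if groups and (groups[-1][0][1] == syl[1] or syl[0] == " "):
--             groups[-1].append(syl)
--         else:
--             groups.append([syl])
--     out = []
--     for g in groups:
--         if len(g) == 1:
--             out.append(g[0])
--         else:
--             out.append(("".join(t[0] for t in g), g[0][1]))
--     return out
-- ===== Notes on version B (the rewrite author's own statement) =====
-- stated objective: alternative
-- what changed: Replaces the index-based single-pass accumulator (with first/last-index special cases) by a two-pass decomposition: first group adjacent syllables into explicit runs keyed by the run's first tuple's second element, then map each run to its merged tuple.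
import Mathlib
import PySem

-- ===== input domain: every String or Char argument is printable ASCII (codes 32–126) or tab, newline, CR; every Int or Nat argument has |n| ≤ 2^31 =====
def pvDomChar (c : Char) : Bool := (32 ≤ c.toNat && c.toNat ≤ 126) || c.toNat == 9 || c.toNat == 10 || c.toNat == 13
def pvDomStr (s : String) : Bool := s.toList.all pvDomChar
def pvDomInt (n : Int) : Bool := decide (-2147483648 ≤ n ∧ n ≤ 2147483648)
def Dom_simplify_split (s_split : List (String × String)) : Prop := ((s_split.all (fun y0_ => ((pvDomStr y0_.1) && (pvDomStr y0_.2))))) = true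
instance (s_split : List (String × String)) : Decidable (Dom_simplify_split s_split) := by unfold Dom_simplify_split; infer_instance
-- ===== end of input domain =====

set_option maxRecDepth 4000


-- B replaces A's index-based accumulator loop by an explicit two-pass grouping decomposition (same cost; objective: alternative).

-- ===== PORT A =====
-- step of A's `for i in range(0, len(s_split))` loop; state = (s_split_simp, in_process_syl)
def pvStepA (s_split : List (String × String))
    (st : List (String × String) × (String × String)) (i : Nat) :
    List (String × String) × (String × String) :=
  let syl := s_split.getD i ("", "")
  let st' :=
    if i = 0 then (st.1, syl)
    else if st.2.2 = syl.2 ∨ syl.1 = " " then (st.1, (st.2.1 ++ syl.1, st.2.2))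
    else (st.1 ++ [st.2], syl)
  if i = s_split.length - 1 then (st'.1 ++ [st'.2], st'.2) else st'

def simplify_split (s_split : List (String × String)) : List (String × String) :=
  ((List.range s_split.length).foldl (pvStepA s_split) ([], ("", ""))).1

-- ===== PORT B =====
-- second pass of B: merge one group (singleton groups are emitted unchanged)
def pvEmit (g : List (String × String)) : String × String :=
  if g.length = 1 then g.headD ("", "")
  else (g.foldl (fun acc t => acc ++ t.1) "", (g.headD ("", "")).2)

-- first pass of B: extend the last group or start a new one
def pvStepB (groups : List (List (String × String))) (syl : String × String) :
    List (List (String × String)) :=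
  match groups.getLast? with
  | some g =>
      if (g.headD ("", "")).2 = syl.2 ∨ syl.1 = " " then
        groups.dropLast ++ [g ++ [syl]]
      else
        groups ++ [[syl]]
  | none => [[syl]]

def simplify_split_alt (s_split : List (String × String)) : List (String × String) :=
  (s_split.foldl pvStepB []).map pvEmit

-- ===== PRECONDITION & SPEC =====
def Spec_simplify_split (s_split : List (String × String)) (out : List (String × String)) : Prop := out = simplify_split_alt s_split
instance (s_split : List (String × String)) (out : List (String × String)) : Decidable (Spec_simplify_split s_split out) := by unfold Spec_simplify_split; infer_instance

-- ===== CLAIM (what is proved, stated in full; the proofs are below) =====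
def Claim_equal_simplify_split : Prop := ∀ (s_split : List (String × String)), Dom_simplify_split s_split → Spec_simplify_split s_split (simplify_split s_split)

-- ===== LEMMAS AND PROOFS =====

-- common reference recursion: merge a run in progress `p` through the remaining syllables
def pvCore (p : String × String) : List (String × String) → List (String × String)
  | [] => [p]
  | syl :: rest =>
      if p.2 = syl.2 ∨ syl.1 = " " then pvCore (p.1 ++ syl.1, p.2) rest
      else p :: pvCore syl rest

theorem pvEmit_cons (g0 : String × String) (gt : List (String × String)) :
    pvEmit (g0 :: gt) = (gt.foldl (fun acc t => acc ++ t.1) g0.1, g0.2) := by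
  cases gt with
  | nil => simp [pvEmit]
  | cons h t =>
    simp only [pvEmit, List.length_cons, List.headD_cons]
    have : ¬ (t.length + 1 + 1 = 1) := by omega
    simp [List.foldl_cons, String.empty_append]

theorem pvLemB (rest : List (String × String)) :
    ∀ (G : List (List (String × String))) (g0 : String × String) (gt : List (String × String)),
    (rest.foldl pvStepB (G ++ [g0 :: gt])).map pvEmit
      = G.map pvEmit ++ pvCore (pvEmit (g0 :: gt)) rest := by
  induction rest with
  | nil => intro G g0 gt; simp [pvCore]
  | cons syl rest ih =>
    intro G g0 gt
    simp only [List.foldl_cons]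
    have hlast : (G ++ [g0 :: gt]).getLast? = some (g0 :: gt) := by
      simp
    by_cases hc : g0.2 = syl.2 ∨ syl.1 = " "
    · have hstep : pvStepB (G ++ [g0 :: gt]) syl = G ++ [(g0 :: gt) ++ [syl]] := by
        simp [pvStepB, hlast, hc]
      rw [hstep]
      have := ih G g0 (gt ++ [syl])
      simp only [List.cons_append] at this ⊢
      rw [this]
      have hc' : (pvEmit (g0 :: gt)).2 = syl.2 ∨ syl.1 = " " := by
        rw [pvEmit_cons]; exact hc
      have : pvCore (pvEmit (g0 :: gt)) (syl :: rest)
          = pvCore ((pvEmit (g0 :: gt)).1 ++ syl.1, (pvEmit (g0 :: gt)).2) rest := by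
        simp [pvCore, hc']
      rw [this]
      congr 1
      rw [pvEmit_cons, pvEmit_cons]
      simp [List.foldl_append]
    · have hstep : pvStepB (G ++ [g0 :: gt]) syl = (G ++ [g0 :: gt]) ++ [[syl]] := by
        simp [pvStepB, hlast, hc]
      rw [hstep]
      have := ih (G ++ [g0 :: gt]) syl []
      rw [this]
      have hc' : ¬ ((pvEmit (g0 :: gt)).2 = syl.2 ∨ syl.1 = " ") := by
        rw [pvEmit_cons]; exact hc
      have hemit : pvEmit [syl] = syl := by simp [pvEmit]
      simp [pvCore, hc', hemit]

theorem altEqCore (x : String × String) (xs : List (String × String)) :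
    simplify_split_alt (x :: xs) = pvCore x xs := by
  unfold simplify_split_alt
  have h0 : pvStepB [] x = ([] : List (List (String × String))) ++ [[x]] := by
    simp [pvStepB]
  simp only [List.foldl_cons, h0]
  rw [pvLemB xs [] x []]
  simp [pvEmit]

-- A's loop from index k (1 ≤ k) onwards, with m indices remaining
theorem pvLemA (xs : List (String × String)) :
    ∀ (m k : Nat) (p : String × String) (simp_ : List (String × String)),
    1 ≤ k → 0 < m → k + m = xs.length →
    ((List.range' k m).foldl (pvStepA xs) (simp_, p)).1 = simp_ ++ pvCore p (xs.drop k) := by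
  intro m
  induction m with
  | zero => intro k p s _ h2 _; omega
  | succ m ih =>
    intro k p simp_ hk _ hkm
    have hklt : k < xs.length := by omega
    have hdrop : xs.drop k = xs[k] :: xs.drop (k + 1) := List.drop_eq_getElem_cons hklt
    have hgetD : xs[k]? = some xs[k] := List.getElem?_eq_getElem hklt
    have hk0 : ¬ (k = 0) := by omega
    rw [List.range'_succ, List.foldl_cons]
    by_cases hc : p.2 = xs[k].2 ∨ xs[k].1 = " "
    · cases m with
      | zero =>
        -- k is the last index
        have hlast : k = xs.length - 1 := by omega
        have hstep : pvStepA xs (simp_, p) k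
            = (simp_ ++ [(p.1 ++ xs[k].1, p.2)], (p.1 ++ xs[k].1, p.2)) := by
          simp [pvStepA, List.getD, hgetD, hk0, hc, ← hlast]
        rw [hstep]
        have hdrop1 : xs.drop (k + 1) = [] := by
          apply List.drop_eq_nil_of_le; omega
        simp [hdrop, hdrop1, pvCore, hc]
      | succ m' =>
        have hnl : ¬ (k = xs.length - 1) := by omega
        have hstep : pvStepA xs (simp_, p) k = (simp_, (p.1 ++ xs[k].1, p.2)) := by
          unfold pvStepA
          simp only [List.getD, hgetD, Option.getD_some]
          rw [if_neg hk0, if_pos hc, if_neg hnl]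
        rw [hstep, ih (k + 1) _ simp_ (by omega) (by omega) (by omega)]
        conv_rhs => rw [hdrop]
        simp only [pvCore]
        rw [if_pos hc]
    · cases m with
      | zero =>
        have hlast : k = xs.length - 1 := by omega
        have hstep : pvStepA xs (simp_, p) k
            = (simp_ ++ [p] ++ [xs[k]], xs[k]) := by
          simp [pvStepA, List.getD, hgetD, hk0, hc, ← hlast]
        rw [hstep]
        have hdrop1 : xs.drop (k + 1) = [] := by
          apply List.drop_eq_nil_of_le; omega
        simp [hdrop, hdrop1, pvCore, hc]
      | succ m' =>
        have hnl : ¬ (k = xs.length - 1) := by omega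
        have hstep : pvStepA xs (simp_, p) k = (simp_ ++ [p], xs[k]) := by
          unfold pvStepA
          simp only [List.getD, hgetD, Option.getD_some]
          rw [if_neg hk0, if_neg hc, if_neg hnl]
        rw [hstep, ih (k + 1) _ (simp_ ++ [p]) (by omega) (by omega) (by omega)]
        conv_rhs => rw [hdrop]
        simp only [pvCore]
        rw [if_neg hc, List.append_assoc, List.singleton_append]

theorem aEqCore (x : String × String) (xs : List (String × String)) :
    simplify_split (x :: xs) = pvCore x xs := by
  unfold simplify_split
  have hlen : (x :: xs).length = xs.length + 1 := by simp
  rw [hlen, List.range_eq_range', List.range'_succ, List.foldl_cons]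
  have hget0 : (x :: xs).getD 0 ("", "") = x := rfl
  cases xs with
  | nil =>
    have hstep : pvStepA [x] (([], ("", "")) : _) 0 = ([x], x) := by
      simp [pvStepA]
    simp [hstep, pvCore]
  | cons y ys =>
    have hnl : ¬ ((0 : Nat) = (x :: y :: ys).length - 1) := by simp
    have hstep : pvStepA (x :: y :: ys) (([], ("", "")) : _) 0 = ([], x) := by
      simp [pvStepA]
    rw [hstep]
    have := pvLemA (x :: y :: ys) ((y :: ys).length) 1 x []
      (by omega) (by simp) (by omega)
    simp only [List.drop_one, List.tail_cons, List.nil_append] at this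
    exact this

-- ===== VERDICT (by name: the statement is the Claim_ definition above) =====
theorem simplify_split_spec : Claim_equal_simplify_split := by
  intro s_split _
  unfold Spec_simplify_split
  cases s_split with
  | nil => rfl
  | cons x xs => rw [aEqCore, altEqCore]
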